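-- pv_equiv track=rewrite | github.com/calebmadrigal/radio-hacking-scripts | auto_crop_signal.py | auto_crop_signal
-- ===== SOURCE A (Python) =====
-- def auto_crop_signal(signal_data, margin_percent=5, num_chunks=16):
--     """ Break the signal into chunks, and find the chunk there is the largest
--     jump from quiet to loud (start index), and the largest jump from
--     loud to quiet (stop index). """
--     chunk_size = int(len(signal_data) / num_chunks)
--     largest_increase_index = 0
--     largest_increase_size = -999999999
--     largest_decrease_index = chunk_size * num_chunks
--     largest_decrease_size = 999999999
--     last_chunk_sum = sum([abs(i) for i in signal_data[0:chunk_size]])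
--     for chunk_start in range(0, len(signal_data), chunk_size):
--         chunk = signal_data[chunk_start:chunk_start+chunk_size]
--         # Don't consider the last chunk if it's not a full chunk,
--         # since that will likely yield the smallest sum
--         if len(chunk) < chunk_size:
--             continue
--         chunk_sum = sum([abs(i) for i in chunk])
--         chunk_diff = chunk_sum - last_chunk_sum
--         last_chunk_sum = chunk_sum
--         if chunk_diff > largest_increase_size:
--             largest_increase_size = chunk_diff
--             largest_increase_index = chunk_start
--         if chunk_diff < largest_decrease_size:
--             largest_decrease_size = chunk_diff
--             largest_decrease_index = chunk_start
--     margin = int((largest_decrease_index - largest_increase_index) * (margin_percent / 100))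
--     return signal_data[largest_increase_index-margin:largest_decrease_index+margin]
-- ===== SOURCE B (Python) =====
-- def _first_extreme(pairs, better):
--     best_idx, best_val = pairs[0]
--     for idx, val in pairs[1:]:
--         if better(val, best_val):
--             best_idx, best_val = idx, val
--     return best_idx
--
--
-- def auto_crop_signal(signal_data, margin_percent=5, num_chunks=16):
--     chunk_size = int(len(signal_data) / num_chunks)
--     full_starts = [s for s in range(0, len(signal_data), chunk_size)
--                    if len(signal_data) - s >= chunk_size]
--     sums = [sum(abs(v) for v in signal_data[s:s + chunk_size]) for s in full_starts]
--     diffs = [0] + [b - a for a, b in zip(sums, sums[1:])]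
--     if full_starts:
--         pairs = list(zip(full_starts, diffs))
--         inc_idx = _first_extreme(pairs, lambda v, w: v > w)
--         dec_idx = _first_extreme(pairs, lambda v, w: v < w)
--     else:
--         inc_idx, dec_idx = 0, chunk_size * num_chunks
--     margin = int((dec_idx - inc_idx) * (margin_percent / 100))
--     return signal_data[inc_idx - margin:dec_idx + margin]
-- ===== Notes on version B (the rewrite author's own statement) =====
-- stated objective: alternative
-- what changed: A fuses chunk-summing, differencing and both extreme searches into one stateful loop with sentinel initials and a continue-skip; B first builds the table of full-chunk starts and their abs-sums, derives the consecutive-difference list by zipping the sum table with its tail, and then picks the crop indices with two independent first-extreme scans (plus an explicit empty-table default branch).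
import Mathlib
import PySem

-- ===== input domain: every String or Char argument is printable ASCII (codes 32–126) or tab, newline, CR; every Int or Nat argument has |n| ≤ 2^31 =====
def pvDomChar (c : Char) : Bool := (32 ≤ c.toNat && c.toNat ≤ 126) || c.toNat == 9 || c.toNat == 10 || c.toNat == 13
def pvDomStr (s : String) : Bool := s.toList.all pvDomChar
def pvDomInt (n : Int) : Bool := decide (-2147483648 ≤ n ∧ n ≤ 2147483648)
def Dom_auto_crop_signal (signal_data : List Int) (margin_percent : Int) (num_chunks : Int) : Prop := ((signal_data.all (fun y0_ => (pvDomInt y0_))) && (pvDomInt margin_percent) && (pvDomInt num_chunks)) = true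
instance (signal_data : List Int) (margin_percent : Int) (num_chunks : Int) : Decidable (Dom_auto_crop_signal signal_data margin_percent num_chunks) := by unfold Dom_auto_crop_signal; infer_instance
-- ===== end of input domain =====

-- B rebuilds A's single stateful loop as: a table of full-chunk sums, a zipped
-- consecutive-difference list, and two independent first-extreme scans (alternative
-- decomposition, same cost).

-- ===== shared float helpers (exact model of CPython's '/' and 'int()' on the inputs both ports meet) =====

-- round-to-nearest-even of (M + δ)·2^0 to a 53-bit significand, sticky = (δ ≠ 0);
-- called either with sticky = false or with M having > 53 bits, where it is exact
def pvRound53 (M : Nat) (sticky : Bool) : Nat × Nat :=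
  let b := M.log2 + 1
  if b ≤ 53 then (M, 0)
  else
    let t := b - 53
    let q := M / 2 ^ t
    let low := M % 2 ^ t
    let half := 2 ^ (t - 1)
    if low > half ∨ (low = half ∧ (sticky ∨ q % 2 = 1)) then (q + 1, t) else (q, t)

-- IEEE-754 double nearest to p/q, as (mantissa, exponent); exact for 1 ≤ |q| ≤ 2^31
-- (the 96 guard bits dominate 1/|q|; no overflow/subnormals arise on such inputs)
def pvTrueDiv (p q : Int) : Int × Int :=
  if p = 0 then (0, 0)
  else
    let sign : Int := if decide (0 < p) = decide (0 < q) then 1 else -1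
    let num := p.natAbs * 2 ^ 96
    let quo := num / q.natAbs
    let rem := num % q.natAbs
    let mt := pvRound53 quo (rem != 0)
    (sign * (mt.1 : Int), (mt.2 : Int) - 96)

-- int(x) for a dyadic x = m·2^e: truncation toward zero
def pvTruncToInt (m e : Int) : Int :=
  if 0 ≤ e then m * 2 ^ e.toNat
  else (if m < 0 then -1 else 1) * ((m.natAbs / 2 ^ (-e).toNat : Nat) : Int)

-- int(p / q): Python true division then int() truncation
def pvIntOfDiv (p q : Int) : Int := pvTruncToInt (pvTrueDiv p q).1 (pvTrueDiv p q).2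

-- int(diff * (mp / 100)): fl(mp/100), exact product by the int diff, IEEE rounding, int()
def pvMarginInt (diff mp : Int) : Int :=
  let me_ := pvTrueDiv mp 100
  let P := diff * me_.1
  if P = 0 then 0
  else
    let mt := pvRound53 P.natAbs false
    pvTruncToInt ((if P < 0 then -1 else 1) * (mt.1 : Int)) (me_.2 + (mt.2 : Int))

-- sum([abs(i) for i in chunk])
def pvAbsSum (chunk : List Int) : Int := (chunk.map (fun i => |i|)).sum

-- ===== PORT A =====
-- signal_data[chunk_start:chunk_start+chunk_size]
def pvChunk (signal_data : List Int) (chunk_size s : Int) : List Int :=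
  PySem.List.slice signal_data (some s) (some (s + chunk_size))

-- loop body after the 'continue' guard; state = (inc_idx, inc_size, dec_idx, dec_size, last_chunk_sum)
def pvStepFull (signal_data : List Int) (chunk_size : Int)
    (st : Int × Int × Int × Int × Int) (chunk_start : Int) : Int × Int × Int × Int × Int :=
  let chunk_sum := pvAbsSum (pvChunk signal_data chunk_size chunk_start)
  let chunk_diff := chunk_sum - st.2.2.2.2
  ((if chunk_diff > st.2.1 then (chunk_start, chunk_diff) else (st.1, st.2.1)).1,
   (if chunk_diff > st.2.1 then (chunk_start, chunk_diff) else (st.1, st.2.1)).2,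
   (if chunk_diff < st.2.2.2.1 then (chunk_start, chunk_diff) else (st.2.2.1, st.2.2.2.1)).1,
   (if chunk_diff < st.2.2.2.1 then (chunk_start, chunk_diff) else (st.2.2.1, st.2.2.2.1)).2,
   chunk_sum)

-- full loop body: 'if len(chunk) < chunk_size: continue'
def pvStepA (signal_data : List Int) (chunk_size : Int)
    (st : Int × Int × Int × Int × Int) (chunk_start : Int) : Int × Int × Int × Int × Int :=
  if ((pvChunk signal_data chunk_size chunk_start).length : Int) < chunk_size then st
  else pvStepFull signal_data chunk_size st chunk_start

def auto_crop_signal (signal_data : List Int) (margin_percent : Int) (num_chunks : Int) : List Int :=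
  let n : Int := signal_data.length
  let chunk_size : Int := pvIntOfDiv n num_chunks
  let st := (PySem.List.pyRange 0 n chunk_size).foldl (pvStepA signal_data chunk_size)
      (0, -999999999, chunk_size * num_chunks, 999999999,
       pvAbsSum (PySem.List.slice signal_data (some 0) (some chunk_size)))
  let margin : Int := pvMarginInt (st.2.2.1 - st.1) margin_percent
  PySem.List.slice signal_data (some (st.1 - margin)) (some (st.2.2.1 + margin))

-- ===== PORT B =====
-- _first_extreme(pairs, better); pairs is nonempty at every call site (Python indexes pairs[0])
def pvFirstExtreme (pairs : List (Int × Int)) (better : Int → Int → Bool) : Int :=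
  match pairs with
  | [] => 0   -- unreachable: B only calls it with nonempty pairs
  | p0 :: rest => (rest.foldl (fun best p => if better p.2 best.2 then p else best) p0).1

def auto_crop_signal_alt (signal_data : List Int) (margin_percent : Int) (num_chunks : Int) : List Int :=
  let n : Int := signal_data.length
  let chunk_size : Int := pvIntOfDiv n num_chunks
  let full_starts := (PySem.List.pyRange 0 n chunk_size).filter (fun s => chunk_size ≤ n - s)
  let sums := full_starts.map (fun s => pvAbsSum (PySem.List.slice signal_data (some s) (some (s + chunk_size))))
  let diffs := 0 :: ((sums.zip (PySem.List.slice sums (some 1) none)).map (fun ab => ab.2 - ab.1))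
  let id2 : Int × Int :=
    if full_starts ≠ [] then
      let pairs := full_starts.zip diffs
      (pvFirstExtreme pairs (fun v w => v > w), pvFirstExtreme pairs (fun v w => v < w))
    else (0, chunk_size * num_chunks)
  let margin : Int := pvMarginInt (id2.2 - id2.1) margin_percent
  PySem.List.slice signal_data (some (id2.1 - margin)) (some (id2.2 + margin))

-- ===== PRECONDITION & SPEC =====
-- Pre_ excludes exactly the inputs where A raises: num_chunks == 0 (ZeroDivisionError)
-- and len(signal_data) < |num_chunks| (then chunk_size == 0 and range() raises ValueError).
def Pre_auto_crop_signal (signal_data : List Int) (margin_percent : Int) (num_chunks : Int) : Prop :=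
  num_chunks ≠ 0 ∧ (num_chunks.natAbs : Int) ≤ (signal_data.length : Int)
instance (signal_data : List Int) (margin_percent : Int) (num_chunks : Int) : Decidable (Pre_auto_crop_signal signal_data margin_percent num_chunks) := by unfold Pre_auto_crop_signal; infer_instance
def pvWitness_auto_crop_signal : List Int × Int × Int := ([1, 2, 30, 40, 3, 1], 5, 3)

def Spec_auto_crop_signal (signal_data : List Int) (margin_percent : Int) (num_chunks : Int) (out : List Int) : Prop := out = auto_crop_signal_alt signal_data margin_percent num_chunks
instance (signal_data : List Int) (margin_percent : Int) (num_chunks : Int) (out : List Int) : Decidable (Spec_auto_crop_signal signal_data margin_percent num_chunks out) := by unfold Spec_auto_crop_signal; infer_instance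

-- ===== CLAIM (what is proved, stated in full; the proofs are below) =====
def Claim_equal_auto_crop_signal : Prop := ∀ (signal_data : List Int) (margin_percent : Int) (num_chunks : Int), Dom_auto_crop_signal signal_data margin_percent num_chunks → Pre_auto_crop_signal signal_data margin_percent num_chunks → Spec_auto_crop_signal signal_data margin_percent num_chunks (auto_crop_signal signal_data margin_percent num_chunks)

-- ===== LEMMAS AND PROOFS =====

-- proof-side abstraction of pvStepFull, with the chunk sum abstracted into f
def pvScanStep (f : Int → Int) (st : Int × Int × Int × Int × Int) (s : Int) : Int × Int × Int × Int × Int :=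
  let d := f s - st.2.2.2.2
  ((if d > st.2.1 then (s, d) else (st.1, st.2.1)).1,
   (if d > st.2.1 then (s, d) else (st.1, st.2.1)).2,
   (if d < st.2.2.2.1 then (s, d) else (st.2.2.1, st.2.2.2.1)).1,
   (if d < st.2.2.2.1 then (s, d) else (st.2.2.1, st.2.2.2.1)).2,
   f s)

def pvFmax (best p : Int × Int) : Int × Int := if p.2 > best.2 then p else best
def pvFmin (best p : Int × Int) : Int × Int := if p.2 < best.2 then p else best

lemma pvStepFull_eq_scan (sd : List Int) (cs : Int) :
    pvStepFull sd cs = pvScanStep (fun s => pvAbsSum (pvChunk sd cs s)) := rfl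

lemma pvFoldl_stepA (sd : List Int) (cs : Int) (l : List Int) :
    ∀ init, l.foldl (pvStepA sd cs) init
      = (l.filter (fun s => decide ¬ ((pvChunk sd cs s).length : Int) < cs)).foldl (pvStepFull sd cs) init := by
  induction l with
  | nil => intro init; rfl
  | cons x t ih =>
    intro init
    simp only [List.foldl_cons, List.filter_cons]
    by_cases h : ((pvChunk sd cs x).length : Int) < cs <;>
      simp [pvStepA, h, ih]

lemma pvFE_gt (p0 : Int × Int) (rest : List (Int × Int)) :
    pvFirstExtreme (p0 :: rest) (fun v w => v > w) = (rest.foldl pvFmax p0).1 := by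
  unfold pvFirstExtreme
  have h : (fun (best p : Int × Int) => if (fun v w : Int => decide (v > w)) p.2 best.2 then p else best) = pvFmax := by
    funext best q
    by_cases h : q.2 > best.2 <;> simp [pvFmax, h]
  rw [h]

lemma pvFE_lt (p0 : Int × Int) (rest : List (Int × Int)) :
    pvFirstExtreme (p0 :: rest) (fun v w => v < w) = (rest.foldl pvFmin p0).1 := by
  unfold pvFirstExtreme
  have h : (fun (best p : Int × Int) => if (fun v w : Int => decide (v < w)) p.2 best.2 then p else best) = pvFmin := by
    funext best q
    by_cases h : q.2 < best.2 <;> simp [pvFmin, h]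
  rw [h]

lemma pvPyRange_nonpos_nil (n cs : Int) (hn : 0 ≤ n) (hcs : cs ≤ 0) :
    PySem.List.pyRange 0 n cs = [] := by
  unfold PySem.List.pyRange
  split_ifs <;> simp_all <;> omega

lemma pvPyRange_pos_nil (a b cs : Int) (hcs : 0 < cs) (h : b ≤ a) :
    PySem.List.pyRange a b cs = [] := by
  rw [PySem.List.pyRange_of_pos a b hcs]
  have : ¬ a < b := by omega
  simp [this]

lemma pvPyRange_zero_cons (n cs : Int) (hcs : 0 < cs) (hn : 0 < n) :
    PySem.List.pyRange 0 n cs = 0 :: PySem.List.pyRange cs n cs := by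
  rw [PySem.List.pyRange_of_pos 0 n hcs, PySem.List.pyRange_of_pos cs n hcs]
  have hq0 : (0 : Int) ≤ (n - 1) / cs := Int.ediv_nonneg (by omega) (by omega)
  have hkey : (n - 0 + cs - 1) / cs = (n - 1) / cs + 1 := by
    have : n - 0 + cs - 1 = (n - 1) + 1 * cs := by ring
    rw [this, Int.add_mul_ediv_right _ _ (by omega : cs ≠ 0)]
  by_cases hlt : cs < n
  · have hcnt : ((n - 0 + cs - 1) / cs).toNat = ((n - cs + cs - 1) / cs).toNat + 1 := by
      have h2 : n - cs + cs - 1 = n - 1 := by ring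
      rw [hkey, h2]; omega
    simp only [hn, hlt, if_pos]
    rw [hcnt, List.range_succ_eq_map]
    simp only [List.map_cons, List.map_map]
    refine List.cons_eq_cons.mpr ⟨by simp, List.map_congr_left ?_⟩
    intro k _
    simp only [Function.comp_apply, Nat.succ_eq_add_one]
    push_cast
    ring
  · have hq : (n - 1) / cs = 0 := Int.ediv_eq_zero_of_lt (by omega) (by omega)
    have hcnt : ((n - 0 + cs - 1) / cs).toNat = 1 := by rw [hkey, hq]; rfl
    simp only [hn, hlt, if_pos, if_neg, not_false_iff]
    rw [hcnt]
    simp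

lemma pvFull_iff (sd : List Int) (cs s : Int) (hcs : 0 < cs) (h0 : 0 ≤ s)
    (h1 : s < (sd.length : Int)) :
    (((pvChunk sd cs s).length : Int) < cs) ↔ ((sd.length : Int) - s < cs) := by
  unfold pvChunk
  rw [PySem.List.length_slice]
  unfold PySem.List.clampIdx
  split_ifs <;> omega

-- the main scan equivalence: A's fused loop = two first-extreme scans over the zipped diffs
lemma pvScan_eq (f : Int → Int) (xs : List Int) : ∀ (prev ii iv di dv : Int),
    xs.foldl (pvScanStep f) (ii, iv, di, dv, f prev)
      = (((xs.zip (((f prev :: xs.map f).zip (xs.map f)).map (fun ab => ab.2 - ab.1))).foldl pvFmax (ii, iv)).1,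
         ((xs.zip (((f prev :: xs.map f).zip (xs.map f)).map (fun ab => ab.2 - ab.1))).foldl pvFmax (ii, iv)).2,
         ((xs.zip (((f prev :: xs.map f).zip (xs.map f)).map (fun ab => ab.2 - ab.1))).foldl pvFmin (di, dv)).1,
         ((xs.zip (((f prev :: xs.map f).zip (xs.map f)).map (fun ab => ab.2 - ab.1))).foldl pvFmin (di, dv)).2,
         f (xs.getLastD prev)) := by
  induction xs with
  | nil => intro prev ii iv di dv; simp
  | cons s t ih =>
    intro prev ii iv di dv
    simp only [List.foldl_cons, List.map_cons, List.zip_cons_cons, List.getLastD_cons]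
    rw [show pvScanStep f (ii, iv, di, dv, f prev) s =
        ((if f s - f prev > iv then (s, f s - f prev) else (ii, iv)).1,
         (if f s - f prev > iv then (s, f s - f prev) else (ii, iv)).2,
         (if f s - f prev < dv then (s, f s - f prev) else (di, dv)).1,
         (if f s - f prev < dv then (s, f s - f prev) else (di, dv)).2,
         f s) from rfl]
    rw [ih s]
    have hmx : pvFmax (ii, iv) (s, f s - f prev)
        = ((if f s - f prev > iv then (s, f s - f prev) else (ii, iv)).1,
           (if f s - f prev > iv then (s, f s - f prev) else (ii, iv)).2) := by
      by_cases h : f s - f prev > iv <;> simp [pvFmax, h]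
    have hmn : pvFmin (di, dv) (s, f s - f prev)
        = ((if f s - f prev < dv then (s, f s - f prev) else (di, dv)).1,
           (if f s - f prev < dv then (s, f s - f prev) else (di, dv)).2) := by
      by_cases h : f s - f prev < dv <;> simp [pvFmin, h]
    rw [hmx, hmn]

-- the crop pair (inc_idx, dec_idx) computed by A's loop equals B's
lemma pvMainState (sd : List Int) (cs nc : Int) :
    (fun st : Int × Int × Int × Int × Int => (st.1, st.2.2.1))
      ((PySem.List.pyRange 0 (sd.length : Int) cs).foldl (pvStepA sd cs)
        (0, -999999999, cs * nc, 999999999,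
         pvAbsSum (PySem.List.slice sd (some 0) (some cs))))
      = (let full_starts := (PySem.List.pyRange 0 (sd.length : Int) cs).filter (fun s => cs ≤ (sd.length : Int) - s)
         let sums := full_starts.map (fun s => pvAbsSum (PySem.List.slice sd (some s) (some (s + cs))))
         let diffs := 0 :: ((sums.zip (PySem.List.slice sums (some 1) none)).map (fun ab => ab.2 - ab.1))
         if full_starts ≠ [] then
           let pairs := full_starts.zip diffs
           (pvFirstExtreme pairs (fun v w => v > w), pvFirstExtreme pairs (fun v w => v < w))
         else (0, cs * nc)) := by
  have hn0 : (0:Int) ≤ (sd.length : Int) := Int.natCast_nonneg _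
  by_cases hcs : 0 < cs
  · by_cases hnn : 0 < (sd.length : Int)
    · rw [pvPyRange_zero_cons _ cs hcs hnn, pvFoldl_stepA]
      have hfc : ((0 :: PySem.List.pyRange cs (sd.length : Int) cs).filter
            (fun s => decide ¬ ((pvChunk sd cs s).length : Int) < cs))
          = ((0 :: PySem.List.pyRange cs (sd.length : Int) cs).filter
            (fun s => decide (cs ≤ (sd.length : Int) - s))) := by
        refine List.filter_congr ?_
        intro x hx
        have hb : 0 ≤ x ∧ x < (sd.length : Int) := by
          rcases List.mem_cons.mp hx with h | h
          · exact ⟨le_of_eq h.symm, by omega⟩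
          · rcases (PySem.List.mem_pyRange_iff_of_pos hcs x).mp h with ⟨h1, h2, _⟩
            exact ⟨by omega, h2⟩
        have hiff := pvFull_iff sd cs x hcs hb.1 hb.2
        simp only [decide_eq_decide, not_lt]
        omega
      rw [hfc]
      by_cases hfull : cs ≤ (sd.length : Int) - 0
      · have hff : (0 :: PySem.List.pyRange cs (sd.length : Int) cs).filter
              (fun s => decide (cs ≤ (sd.length : Int) - s))
            = 0 :: (PySem.List.pyRange cs (sd.length : Int) cs).filter
              (fun s => decide (cs ≤ (sd.length : Int) - s)) := by
          simp only [List.filter_cons]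
          rw [if_pos (by simpa using hfull)]
        rw [hff, List.foldl_cons]
        have hstep0 : pvStepFull sd cs (0, -999999999, cs * nc, 999999999,
              pvAbsSum (PySem.List.slice sd (some 0) (some cs))) 0
            = (0, 0, 0, 0, pvAbsSum (pvChunk sd cs 0)) := by
          norm_num [pvStepFull, pvChunk]
        rw [hstep0, pvStepFull_eq_scan]
        have hsc := pvScan_eq (fun s => pvAbsSum (pvChunk sd cs s))
          ((PySem.List.pyRange cs (sd.length : Int) cs).filter
            (fun s => decide (cs ≤ (sd.length : Int) - s))) 0 0 0 0 0
        beta_reduce at hsc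
        rw [hsc]
        simp [pvChunk, pvFE_gt, pvFE_lt, PySem.List.slice_from_one]
      · have hnil : PySem.List.pyRange cs (sd.length : Int) cs = [] :=
          pvPyRange_pos_nil cs (sd.length : Int) cs hcs (by omega)
        rw [hnil]
        have hff : List.filter (fun s => decide (cs ≤ (sd.length : Int) - s)) [0] = [] := by
          simp only [List.filter_cons, List.filter_nil]
          rw [if_neg (by simpa using hfull)]
        rw [hff]
        simp
    · have h0 : PySem.List.pyRange 0 (sd.length : Int) cs = [] :=
        pvPyRange_pos_nil 0 (sd.length : Int) cs hcs (by omega)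
      rw [h0]
      simp
  · rw [pvPyRange_nonpos_nil _ cs hn0 (by omega)]
    simp

-- ===== VERDICT (by name: the statement is the Claim_ definition above) =====
set_option maxHeartbeats 1000000 in
theorem auto_crop_signal_spec : Claim_equal_auto_crop_signal := by
  intro sd mp nc _hdom _hpre
  unfold Spec_auto_crop_signal
  show auto_crop_signal sd mp nc = auto_crop_signal_alt sd mp nc
  have h := pvMainState sd (pvIntOfDiv (sd.length : Int) nc) nc
  beta_reduce at h
  have h1 := congrArg Prod.fst h
  have h2 := congrArg Prod.snd h
  simp only [] at h1 h2
  simp only [auto_crop_signal, auto_crop_signal_alt]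
  rw [h1, h2]
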